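-- pv_equiv track=rewrite | github.com/bryanelihea/OpenScanPy | scripts/bsdl_parser.py | concat_ampersand_lines
-- ===== SOURCE A (Python) =====
-- def concat_ampersand_lines(content):
--     if content:
--         lines = content.splitlines()
--         processed_lines = []
--         buffer = ""
--
--         for line in lines:
--             if line.strip().endswith("&"):
--                 buffer += line.strip()[:-1]  # Remove the trailing '&' and keep the line content
--             else:
--                 buffer += line.strip()
--                 processed_lines.append(buffer)
--                 buffer = ""  # Reset the buffer for the next group of lines
--
--         # Join the processed lines back into a single string with CRLF line endings
--         return "\r\n".join(processed_lines).replace('""', '')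
--     return content
-- ===== SOURCE B (Python) =====
-- def concat_ampersand_lines(content):
--     if content:
--         lines = [line.strip() for line in content.splitlines()]
--         merged = "\n".join(lines).replace("&\n", "")
--         segments = merged.split("\n")
--         if lines and lines[-1].endswith("&"):
--             segments = segments[:-1]
--         return "\r\n".join(segments).replace('""', '')
--     return content
-- ===== Notes on version B (the rewrite author's own statement) =====
-- stated objective: idiomatic
-- what changed: A's character-accumulating buffer loop is replaced by whole-string operations: strip all lines, join them on newline, delete every ampersand-newline pair with one str.replace (exactly the buffer concatenation), split back on newline, and drop the dangling last segment when the last line still ends in an ampersand (the buffer A leaves unflushed).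
import Mathlib
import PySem

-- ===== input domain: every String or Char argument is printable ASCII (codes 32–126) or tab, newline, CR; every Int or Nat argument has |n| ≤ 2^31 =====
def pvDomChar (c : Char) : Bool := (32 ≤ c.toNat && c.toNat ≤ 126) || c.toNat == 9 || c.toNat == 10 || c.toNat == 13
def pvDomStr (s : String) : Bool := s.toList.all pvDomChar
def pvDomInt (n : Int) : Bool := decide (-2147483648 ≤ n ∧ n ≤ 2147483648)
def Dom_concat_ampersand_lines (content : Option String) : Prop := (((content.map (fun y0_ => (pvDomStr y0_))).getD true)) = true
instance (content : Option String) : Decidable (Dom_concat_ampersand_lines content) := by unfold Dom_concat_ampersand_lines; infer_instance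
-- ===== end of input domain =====

-- B replaces A's explicit buffer loop by whole-string operations: strip the lines, join them on newline,
-- delete every ampersand-newline pair with one replace (exactly the buffer concatenation), split back on
-- newline and drop the dangling last segment when the last line still ends in an ampersand (the buffer A
-- leaves unflushed). Objective: idiomatic.

-- ===== PORT A =====
def concat_ampersand_lines (content : Option String) : Option String :=
  match content with
  | none => none
  | some s =>
    if s.toList ≠ [] then
      -- lines = content.splitlines(); loop with (processed_lines, buffer) state
      let lines := PySem.Chars.splitlines s.toList
      let st := lines.foldl (fun (st : List (List Char) × List Char) line =>
        if PySem.Chars.endswith (PySem.Chars.strip line) ['&'] then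
          (st.1, st.2 ++ PySem.Chars.slice (PySem.Chars.strip line) none (some (-1)))
        else
          (st.1 ++ [st.2 ++ PySem.Chars.strip line], [])) (([], []) : List (List Char) × List Char)
      some (String.ofList (PySem.Chars.replace (PySem.Chars.join ['\r', '\n'] st.1) ['"', '"'] []))
    else some s

-- ===== PORT B =====
def concat_ampersand_lines_alt (content : Option String) : Option String :=
  match content with
  | none => none
  | some s =>
    if s.toList ≠ [] then
      let lines := (PySem.Chars.splitlines s.toList).map PySem.Chars.strip
      let merged := PySem.Chars.replace (PySem.Chars.join ['\n'] lines) ['&', '\n'] []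
      let segments := PySem.Chars.splitOn merged ['\n']
      -- if lines and lines[-1].endswith("&"): segments = segments[:-1]
      let segments' := match PySem.List.pyGet? lines (-1) with
        | some last => if PySem.Chars.endswith last ['&'] then PySem.List.slice segments none (some (-1)) else segments
        | none => segments
      some (String.ofList (PySem.Chars.replace (PySem.Chars.join ['\r', '\n'] segments') ['"', '"'] []))
    else some s

-- ===== PRECONDITION & SPEC =====
def Spec_concat_ampersand_lines (content : Option String) (out : Option String) : Prop := out = concat_ampersand_lines_alt content
instance (content : Option String) (out : Option String) : Decidable (Spec_concat_ampersand_lines content out) := by unfold Spec_concat_ampersand_lines; infer_instance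

-- ===== CLAIM (what is proved, stated in full; the proofs are below) =====
def Claim_equal_concat_ampersand_lines : Prop := ∀ (content : Option String), Dom_concat_ampersand_lines content → Spec_concat_ampersand_lines content (concat_ampersand_lines content)

-- ===== LEMMAS AND PROOFS =====

def scrub : List Char → List Char
  | [] => []
  | [c] => [c]
  | c :: c' :: t => if c = '&' ∧ c' = '\n' then scrub t else c :: scrub (c' :: t)

lemma replace_go_eq_scrub (fuel : Nat) (l acc : List Char) (h : l.length ≤ fuel) :
    PySem.Chars.replace.go ['&', '\n'] [] fuel l acc = acc.reverse ++ scrub l := by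
  induction fuel generalizing l acc with
  | zero =>
    have : l = [] := by cases l <;> simp_all
    subst this
    simp [PySem.Chars.replace.go, scrub]
  | succ n ih =>
    match l with
    | [] => simp [PySem.Chars.replace.go, scrub]
    | [c] =>
      rw [PySem.Chars.replace.go]
      simp [List.isPrefixOf, scrub]
      rw [ih [] (c :: acc) (by simp)]
      simp [scrub]
    | c :: c' :: t =>
      rw [PySem.Chars.replace.go]
      simp only [List.isPrefixOf, Bool.and_true]
      by_cases hc : c = '&' ∧ c' = '\n'
      · obtain ⟨rfl, rfl⟩ := hc
        simp only [beq_self_eq_true, Bool.and_self, if_pos, List.length_cons, List.drop_succ_cons,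
          List.drop_zero, List.reverse_nil, List.nil_append, List.length_nil]
        rw [ih t acc (by simp at h; omega)]
        simp [scrub]
      · have : (c == '&' && c' == '\n') = false := by
          by_contra hb
          simp at hb
          exact hc ⟨hb.1, hb.2⟩
        rw [if_neg (by simp; rintro rfl rfl; exact hc ⟨rfl, rfl⟩)]
        rw [ih (c' :: t) (c :: acc) (by simp at h ⊢; omega)]
        simp [scrub, hc]

lemma replace_amp_eq_scrub (s : List Char) :
    PySem.Chars.replace s ['&', '\n'] [] = scrub s := by
  rw [PySem.Chars.replace]
  rw [if_neg (by simp)]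
  exact replace_go_eq_scrub s.length s [] (le_refl _)

def mySplit : List Char → List Char × List (List Char)
  | [] => ([], [])
  | c :: t => if c = '\n' then ([], (mySplit t).1 :: (mySplit t).2) else (c :: (mySplit t).1, (mySplit t).2)

lemma splitOn_go_eq_mySplit (fuel : Nat) (l cur : List Char) (acc : List (List Char)) (h : l.length ≤ fuel) :
    PySem.Chars.splitOn.go ['\n'] fuel l cur acc
      = acc.reverse ++ (cur.reverse ++ (mySplit l).1) :: (mySplit l).2 := by
  induction fuel generalizing l cur acc with
  | zero =>
    have : l = [] := by cases l <;> simp_all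
    subst this
    simp [PySem.Chars.splitOn.go, mySplit]
  | succ n ih =>
    match l with
    | [] => simp [PySem.Chars.splitOn.go, mySplit]
    | c :: t =>
      rw [PySem.Chars.splitOn.go]
      simp only [List.isPrefixOf, Bool.and_true]
      by_cases hc : c = '\n'
      · subst hc
        simp only [beq_self_eq_true, if_pos, List.length_cons, List.drop_succ_cons, List.drop_zero,
          List.length_nil]
        rw [ih t [] (cur.reverse :: acc) (by simp at h; omega)]
        simp [mySplit]
      · rw [if_neg (by simp; exact fun h1 => absurd h1.symm hc)]
        rw [ih t (c :: cur) acc (by simp at h; omega)]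
        simp [mySplit, hc]

lemma splitOn_nl_eq_mySplit (s : List Char) :
    PySem.Chars.splitOn s ['\n'] = (mySplit s).1 :: (mySplit s).2 := by
  rw [PySem.Chars.splitOn]
  rw [splitOn_go_eq_mySplit (s.length + 1) s [] [] (by omega)]
  simp

lemma scrub_no_nl (s : List Char) (h : '\n' ∉ s) : scrub s = s := by
  induction s with
  | nil => simp [scrub]
  | cons c t ih =>
    match t with
    | [] => simp [scrub]
    | c' :: t' =>
      rw [scrub]
      rw [if_neg (by rintro ⟨rfl, rfl⟩; simp at h)]
      rw [ih (by simp at h ⊢; tauto)]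

lemma scrub_append_amp (s t : List Char) (h : '\n' ∉ s) :
    scrub (s ++ '&' :: '\n' :: t) = s ++ scrub t := by
  induction s with
  | nil => simp [scrub]
  | cons c s' ih =>
    have hc : c ≠ '\n' := by simp at h; tauto
    have h' : '\n' ∉ s' := by simp at h; tauto
    cases s' with
    | nil => simp only [List.nil_append, List.cons_append, scrub]; rw [if_neg (by rintro ⟨rfl, h2⟩; simp at h2)]; simp
    | cons d s'' =>
      simp only [List.cons_append, scrub]
      rw [if_neg (by rintro ⟨rfl, rfl⟩; simp at h)]
      simpa using ih h'

lemma scrub_append_nl (s t : List Char) (h : '\n' ∉ s) (ha : PySem.Chars.endswith s ['&'] = false) :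
    scrub (s ++ '\n' :: t) = s ++ '\n' :: scrub t := by
  induction s with
  | nil =>
    cases t with
    | nil => simp [scrub]
    | cons d t' => simp only [List.nil_append, scrub]; rw [if_neg (by rintro ⟨h1, _⟩; simp at h1)]
  | cons c s' ih =>
    have h' : '\n' ∉ s' := by simp at h; tauto
    cases s' with
    | nil =>
      have hc : c ≠ '&' := by
        intro rfl'; subst rfl'
        simp [PySem.Chars.endswith, List.isSuffixOf] at ha
      simp only [List.nil_append, List.cons_append, scrub]
      rw [if_neg (by rintro ⟨rfl, _⟩; exact hc rfl)]
      cases t with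
      | nil => simp [scrub]
      | cons d t' => simp only [scrub]; rw [if_neg (by rintro ⟨h1, _⟩; simp at h1)]
    | cons d s'' =>
      have ha' : PySem.Chars.endswith (d :: s'') ['&'] = false := by
        rw [← Bool.not_eq_true] at ha ⊢
        rw [PySem.Chars.endswith_iff] at ha ⊢
        intro hsuf
        exact ha (hsuf.trans (List.suffix_cons c _))
      simp only [List.cons_append, scrub]
      rw [if_neg (by rintro ⟨rfl, rfl⟩; simp at h)]
      simpa using ih h' ha'

lemma mySplit_no_nl (s : List Char) (h : '\n' ∉ s) : mySplit s = (s, []) := by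
  induction s with
  | nil => simp [mySplit]
  | cons c t ih =>
    rw [mySplit, if_neg (by simp at h; tauto)]
    rw [ih (by simp at h; tauto)]

lemma mySplit_append (s t : List Char) (h : '\n' ∉ s) :
    mySplit (s ++ t) = (s ++ (mySplit t).1, (mySplit t).2) := by
  induction s with
  | nil => simp
  | cons c s' ih =>
    simp only [List.cons_append, mySplit]
    rw [if_neg (by simp at h; tauto), ih (by simp at h; tauto)]

lemma endswith_amp_dropLast (l : List Char) (h : PySem.Chars.endswith l ['&'] = true) :
    l.dropLast ++ ['&'] = l := by
  rw [PySem.Chars.endswith_iff] at h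
  obtain ⟨t, rfl⟩ := h
  simp

def specMerge : List (List Char) → List Char
  | [] => []
  | [l] => l
  | l :: l2 :: ls =>
    if PySem.Chars.endswith l ['&'] then l.dropLast ++ specMerge (l2 :: ls)
    else l ++ '\n' :: specMerge (l2 :: ls)

lemma dropLast_no_nl (l : List Char) (h : '\n' ∉ l) : '\n' ∉ l.dropLast :=
  fun hm => h ((List.dropLast_sublist (l := l)).subset hm)

lemma scrub_intercalate (L : List (List Char)) (hne : L ≠ []) (h : ∀ l ∈ L, '\n' ∉ l) :
    scrub (List.intercalate ['\n'] L) = specMerge L := by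
  induction L with
  | nil => exact absurd rfl hne
  | cons l ls ih =>
    cases ls with
    | nil =>
      simp only [List.intercalate, List.intersperse, List.flatten, specMerge]
      simp [scrub_no_nl l (h l (by simp))]
    | cons l2 ls2 =>
      have hl : '\n' ∉ l := h l (by simp)
      have hrest : ∀ x ∈ l2 :: ls2, '\n' ∉ x := fun x hx => h x (List.mem_cons_of_mem _ hx)
      have hi : List.intercalate ['\n'] (l :: l2 :: ls2) = l ++ '\n' :: List.intercalate ['\n'] (l2 :: ls2) := by
        simp [List.intercalate, List.intersperse]
      rw [hi, specMerge]
      by_cases ha : PySem.Chars.endswith l ['&']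
      · rw [if_pos ha]
        conv_lhs => rw [← endswith_amp_dropLast l ha]
        rw [List.append_assoc]
        simp only [List.cons_append, List.nil_append]
        rw [scrub_append_amp _ _ (dropLast_no_nl l hl)]
        rw [ih (List.cons_ne_nil _ _) hrest]
      · rw [if_neg ha]
        rw [scrub_append_nl _ _ hl (by simpa using ha)]
        rw [ih (List.cons_ne_nil _ _) hrest]

def specP (buf : List Char) : List (List Char) → List (List Char)
  | [] => []
  | l :: ls =>
    if PySem.Chars.endswith l ['&'] then specP (buf ++ l.dropLast) ls
    else (buf ++ l) :: specP [] ls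

def lastAmp (L : List (List Char)) : Bool :=
  match L.getLast? with
  | some x => PySem.Chars.endswith x ['&']
  | none => false

lemma mainB (L : List (List Char)) (buf : List Char) (hne : L ≠ []) (h : ∀ l ∈ L, '\n' ∉ l) :
    ∃ r, (buf ++ (mySplit (specMerge L)).1) :: (mySplit (specMerge L)).2
      = specP buf L ++ (if lastAmp L then [r] else []) := by
  induction L generalizing buf with
  | nil => exact absurd rfl hne
  | cons l ls ih =>
    cases ls with
    | nil =>
      have hl : '\n' ∉ l := h l (by simp)
      simp only [specMerge]
      rw [mySplit_no_nl l hl]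
      by_cases ha : PySem.Chars.endswith l ['&']
      · exact ⟨buf ++ l, by simp [lastAmp, ha, specP]⟩
      · exact ⟨[], by simp [lastAmp, ha, specP]⟩
    | cons l2 ls2 =>
      have hl : '\n' ∉ l := h l (by simp)
      have hrest : ∀ x ∈ l2 :: ls2, '\n' ∉ x := fun x hx => h x (List.mem_cons_of_mem _ hx)
      have hla : lastAmp (l :: l2 :: ls2) = lastAmp (l2 :: ls2) := by
        simp [lastAmp, List.getLast?_cons_cons]
      rw [specMerge, hla]
      by_cases ha : PySem.Chars.endswith l ['&']
      · rw [if_pos ha]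
        rw [mySplit_append _ _ (dropLast_no_nl l hl)]
        obtain ⟨r, hr⟩ := ih (buf ++ l.dropLast) (List.cons_ne_nil _ _) hrest
        refine ⟨r, ?_⟩
        rw [← List.append_assoc, hr]
        simp [specP, ha]
      · rw [if_neg ha]
        rw [mySplit_append _ _ hl]
        simp only [mySplit, reduceIte]
        obtain ⟨r, hr⟩ := ih [] (List.cons_ne_nil _ _) hrest
        simp only [List.nil_append] at hr
        refine ⟨r, ?_⟩
        simp only [List.append_nil]
        simp only [specP, ha, Bool.false_eq_true, if_false]
        rw [hr]
        conv_lhs => rw [specP]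
        simp


lemma foldA (lines : List (List Char)) (proc : List (List Char)) (buf : List Char) :
    (lines.foldl (fun (st : List (List Char) × List Char) line =>
        if PySem.Chars.endswith (PySem.Chars.strip line) ['&'] then
          (st.1, st.2 ++ PySem.Chars.slice (PySem.Chars.strip line) none (some (-1)))
        else
          (st.1 ++ [st.2 ++ PySem.Chars.strip line], [])) (proc, buf)).1
      = proc ++ specP buf (lines.map PySem.Chars.strip) := by
  induction lines generalizing proc buf with
  | nil => simp [specP]
  | cons line rest ih =>
    simp only [List.foldl_cons, List.map_cons, specP]
    by_cases ha : PySem.Chars.endswith (PySem.Chars.strip line) ['&']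
    · rw [if_pos ha, if_pos ha, ih]
      have : PySem.Chars.slice (PySem.Chars.strip line) none (some (-1)) = (PySem.Chars.strip line).dropLast := by
        simp [pysem]
      rw [this]
    · rw [if_neg ha, if_neg ha, ih]
      simp

lemma splitlines_go_no_nl (isB : Char → Bool) (s cur : List Char) (acc : List (List Char)) :
    (∀ c ∈ cur, isB c = false) → (∀ l ∈ acc, ∀ c ∈ l, isB c = false) →
    ∀ l ∈ PySem.Chars.splitlines.go isB s cur acc, ∀ c ∈ l, isB c = false := by
  induction s, cur, acc using PySem.Chars.splitlines.go.induct isB with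
  | case1 cur acc hc =>
    intro hcur hacc l hl
    rw [PySem.Chars.splitlines.go.eq_1, if_pos hc] at hl
    exact hacc l (List.mem_reverse.mp hl)
  | case2 cur acc hc =>
    intro hcur hacc l hl
    rw [PySem.Chars.splitlines.go.eq_1, if_neg hc, List.mem_reverse] at hl
    rcases List.mem_cons.mp hl with rfl | hl'
    · intro c hcl; exact hcur c (List.mem_reverse.mp hcl)
    · exact hacc l hl'
  | case3 rest cur acc ih =>
    intro hcur hacc l hl
    rw [PySem.Chars.splitlines.go.eq_2] at hl
    refine ih (by simp) ?_ l hl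
    intro l' hl'
    rcases List.mem_cons.mp hl' with rfl | hl'
    · intro c hc; exact hcur c (List.mem_reverse.mp hc)
    · exact hacc l' hl'
  | case4 c rest cur acc hne hb ih =>
    intro hcur hacc l hl
    rw [PySem.Chars.splitlines.go.eq_3 isB cur acc c rest hne, if_pos hb] at hl
    refine ih (by simp) ?_ l hl
    intro l' hl'
    rcases List.mem_cons.mp hl' with rfl | hl'
    · intro d hd; exact hcur d (List.mem_reverse.mp hd)
    · exact hacc l' hl'
  | case5 c rest cur acc hne hb ih =>
    intro hcur hacc l hl
    rw [PySem.Chars.splitlines.go.eq_3 isB cur acc c rest hne, if_neg hb] at hl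
    refine ih ?_ hacc l hl
    intro d hd
    rcases List.mem_cons.mp hd with rfl | hd
    · exact Bool.not_eq_true _ ▸ (by simpa using hb)
    · exact hcur d hd

lemma splitlines_no_nl (s : List Char) : ∀ l ∈ PySem.Chars.splitlines s, '\n' ∉ l := by
  intro l hl hmem
  rw [PySem.Chars.splitlines] at hl
  have := splitlines_go_no_nl _ s [] [] (by simp) (by simp) l hl '\n' hmem
  simp at this

lemma strip_no_nl (l : List Char) (h : '\n' ∉ l) : '\n' ∉ PySem.Chars.strip l := by
  intro hm
  apply h
  rw [PySem.Chars.strip, PySem.Chars.rstrip, PySem.Chars.lstrip] at hm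
  have h1 := (List.dropWhile_sublist (l := (List.dropWhile PySem.Chars.isspace l).reverse) PySem.Chars.isspace).subset (List.mem_reverse.mp hm)
  rw [List.mem_reverse] at h1
  exact (List.dropWhile_sublist (l := l) PySem.Chars.isspace).subset h1

lemma splitlines_go_ne_nil (isB : Char → Bool) (s cur : List Char) (acc : List (List Char)) :
    (acc ≠ [] ∨ cur ≠ [] ∨ s ≠ []) →
    PySem.Chars.splitlines.go isB s cur acc ≠ [] := by
  induction s, cur, acc using PySem.Chars.splitlines.go.induct isB with
  | case1 cur acc hc =>
    intro h
    rw [PySem.Chars.splitlines.go.eq_1, if_pos hc]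
    have : cur = [] := by simpa using hc
    subst this
    rcases h with h | h | h <;> simp_all
  | case2 cur acc hc =>
    intro _
    rw [PySem.Chars.splitlines.go.eq_1, if_neg hc]
    simp
  | case3 rest cur acc ih =>
    intro _
    rw [PySem.Chars.splitlines.go.eq_2]
    exact ih (Or.inl (by simp))
  | case4 c rest cur acc hne hb ih =>
    intro _
    rw [PySem.Chars.splitlines.go.eq_3 isB cur acc c rest hne, if_pos hb]
    exact ih (Or.inl (by simp))
  | case5 c rest cur acc hne hb ih =>
    intro _
    rw [PySem.Chars.splitlines.go.eq_3 isB cur acc c rest hne, if_neg hb]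
    exact ih (Or.inr (Or.inl (by simp)))

lemma splitlines_ne_nil (s : List Char) (h : s ≠ []) : PySem.Chars.splitlines s ≠ [] := by
  rw [PySem.Chars.splitlines]
  exact splitlines_go_ne_nil _ s [] [] (Or.inr (Or.inr h))

lemma pyGet_neg_one {α : Type} (L : List α) (hne : L ≠ []) :
    PySem.List.pyGet? L (-1) = L.getLast? := by
  have hlen : 0 < L.length := List.length_pos_iff.mpr hne
  rw [PySem.List.pyGet?, PySem.List.pyIdx?]
  rw [if_neg (by omega), if_pos (by omega)]
  simp only [Option.bind_some]
  rw [List.getLast?_eq_getElem?]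
  norm_num


-- ===== VERDICT (by name: the statement is the Claim_ definition above) =====
theorem concat_ampersand_lines_spec : Claim_equal_concat_ampersand_lines := by
  intro content _
  unfold Spec_concat_ampersand_lines
  show concat_ampersand_lines content = concat_ampersand_lines_alt content
  match content with
  | none => rfl
  | some s =>
    by_cases hs : s.toList = []
    · simp [concat_ampersand_lines, concat_ampersand_lines_alt, hs]
    · simp only [concat_ampersand_lines, concat_ampersand_lines_alt]
      rw [if_pos (by simpa using hs), if_pos (by simpa using hs)]
      set lines := PySem.Chars.splitlines s.toList with hlines
      set L := lines.map PySem.Chars.strip with hL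
      have hLne : L ≠ [] := by
        simp only [hL, ne_eq, List.map_eq_nil_iff]
        exact splitlines_ne_nil s.toList hs
      have hnn : ∀ l ∈ L, '\n' ∉ l := by
        intro l hl
        obtain ⟨l0, hl0, rfl⟩ := List.mem_map.mp hl
        exact strip_no_nl l0 (splitlines_no_nl s.toList l0 hl0)
      obtain ⟨x, hx⟩ : ∃ x, L.getLast? = some x := by
        cases hgl : L.getLast? with
        | none => exact absurd (List.getLast?_eq_none_iff.mp hgl) hLne
        | some x => exact ⟨x, rfl⟩
      -- A side
      rw [foldA lines [] []]
      simp only [List.nil_append]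
      -- B side
      have hjoin : PySem.Chars.join ['\n'] L = List.intercalate ['\n'] L := rfl
      rw [hjoin, replace_amp_eq_scrub, scrub_intercalate L hLne hnn]
      rw [splitOn_nl_eq_mySplit]
      obtain ⟨r, hr⟩ := mainB L [] hLne hnn
      simp only [List.nil_append] at hr
      rw [pyGet_neg_one L hLne, hx]
      dsimp only
      by_cases ha : PySem.Chars.endswith x ['&']
      · rw [if_pos ha]
        have hla : lastAmp L = true := by simp [lastAmp, hx, ha]
        rw [hla] at hr
        simp only [if_true] at hr
        rw [hr]
        have hsl : PySem.List.slice (specP [] L ++ [r]) none (some (-1)) = specP [] L := by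
          have h2 : PySem.List.slice (specP [] L ++ [r]) none (some (-1)) = (specP [] L ++ [r]).dropLast := by
            simp [pysem]
          rw [h2, List.dropLast_concat]
        rw [hsl]
      · rw [if_neg ha]
        have hla : lastAmp L = false := by simp [lastAmp, hx, ha]
        rw [hla] at hr
        simp only [Bool.false_eq_true, if_false, List.append_nil] at hr
        rw [hr]
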